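-- pv_equiv track=rewrite | github.com/elaplas/data_structure_and_algos | puzzels/gas_stations/gas_stations.py | gas_station_helper
-- ===== SOURCE A (Python) =====
-- def gas_station_helper(gas_stations, costs, start_index, cur_index, second_round, leftover ):
--
--     if start_index == cur_index and second_round:
--         return cur_index
--
--     if (leftover + gas_stations[cur_index]) - costs[cur_index] < 0:
--         return -1
--
--     leftover = (leftover + gas_stations[cur_index]) - costs[cur_index]
--
--     if cur_index == len(gas_stations) -1:
--         cur_index = 0
--     else:
--         cur_index += 1
--
--     return gas_station_helper(gas_stations, costs, start_index, cur_index, True,  leftover)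
-- ===== SOURCE B (Python) =====
-- def gas_station_helper(gas_stations, costs, start_index, cur_index, second_round, leftover):
--     # Iterative: precompute per-station deltas and the fixed path length
--     # d = (start_index - cur_index) % n, then walk that many positions from
--     # cur_index; return start_index if the running total never goes negative, else -1.
--     if second_round and start_index == cur_index:
--         return cur_index
--     n = len(gas_stations)
--     deltas = [gas_stations[i] - costs[i] for i in range(n)]
--     d = (start_index - cur_index) % n
--     if d == 0:
--         d = n
--     total = leftover
--     i = cur_index
--     for _ in range(d):
--         total += deltas[i]
--         if total < 0:
--             return -1
--         i = (i + 1) % n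
--     return start_index
-- ===== Notes on version B (the rewrite author's own statement) =====
-- stated objective: simpler
-- what changed: A's unbounded tail recursion is replaced by an iterative for-loop over the precomputed path length (start_index - cur_index) % n, accumulating the leftover and returning start_index or -1; no recursion and no index-wrapping state machine.
-- outside the precondition, e.g. on gas_station_helper([0, -1], [0, 0], 1, -2, True, 0): A returns -1, B returns 1
import Mathlib
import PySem

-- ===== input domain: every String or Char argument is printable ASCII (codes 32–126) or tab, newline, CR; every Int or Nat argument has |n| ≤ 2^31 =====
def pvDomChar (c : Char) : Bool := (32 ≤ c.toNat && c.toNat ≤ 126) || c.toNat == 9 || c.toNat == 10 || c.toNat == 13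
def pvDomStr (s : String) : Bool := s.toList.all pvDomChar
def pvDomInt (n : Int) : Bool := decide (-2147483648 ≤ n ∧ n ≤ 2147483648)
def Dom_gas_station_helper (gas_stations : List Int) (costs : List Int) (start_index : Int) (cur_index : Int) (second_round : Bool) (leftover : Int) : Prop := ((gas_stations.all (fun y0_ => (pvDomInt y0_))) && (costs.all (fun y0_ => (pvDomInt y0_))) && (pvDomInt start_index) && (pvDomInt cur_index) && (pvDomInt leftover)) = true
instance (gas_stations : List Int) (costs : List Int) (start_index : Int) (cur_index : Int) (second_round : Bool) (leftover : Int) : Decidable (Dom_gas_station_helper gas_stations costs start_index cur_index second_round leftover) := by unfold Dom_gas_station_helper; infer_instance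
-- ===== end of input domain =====

-- B replaces A's unbounded tail recursion by an iterative for-loop over the precomputed
-- path length (start_index - cur_index) % n (objective: simpler).

-- ===== PORT A =====
-- A's tail recursion, with a fuel counter only to make it total in Lean; under Pre_ the
-- recursion terminates in at most gas_stations.length steps, so fuel is never exhausted.
def gasFuelA (gas_stations : List Int) (costs : List Int) (start_index : Int) :
    Nat → Int → Bool → Int → Int
  | 0, _, _, _ => 0
  | fuel + 1, cur_index, second_round, leftover =>
    if start_index = cur_index ∧ second_round = true then cur_index
    else
      match PySem.List.pyGet? gas_stations cur_index, PySem.List.pyGet? costs cur_index with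
      | some g, some c =>
        if leftover + g - c < 0 then -1
        else
          gasFuelA gas_stations costs start_index fuel
            (if cur_index = PySem.List.len gas_stations - 1 then 0 else cur_index + 1)
            true (leftover + g - c)
      | _, _ => 0   -- IndexError in Python; excluded by Pre_

def gas_station_helper (gas_stations : List Int) (costs : List Int) (start_index : Int) (cur_index : Int) (second_round : Bool) (leftover : Int) : Int :=
  gasFuelA gas_stations costs start_index (gas_stations.length + 1) cur_index second_round leftover

-- ===== PORT B =====
-- the 'for _ in range(d)' loop of Source B, carrying the position i and the total
def altLoop (deltas : List Int) (start_index : Int) (n : Int) :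
    Nat → Int → Int → Int
  | 0, _, _ => start_index
  | d + 1, i, total =>
    let t := total + PySem.List.pyGetD deltas i 0
    if t < 0 then -1 else altLoop deltas start_index n d (PySem.Int.mod (i + 1) n) t

def gas_station_helper_alt (gas_stations : List Int) (costs : List Int) (start_index : Int) (cur_index : Int) (second_round : Bool) (leftover : Int) : Int :=
  if second_round = true ∧ start_index = cur_index then cur_index
  else
    let n := PySem.List.len gas_stations
    -- the comprehension [gas_stations[i] - costs[i] for i in range(n)]; the pyGetD
    -- defaults are never used under Pre_ (i < n ≤ len costs)
    let deltas := (PySem.List.pyRange 0 n 1).map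
      (fun i => PySem.List.pyGetD gas_stations i 0 - PySem.List.pyGetD costs i 0)
    let d0 := PySem.Int.mod (start_index - cur_index) n
    let d := if d0 = 0 then n else d0
    altLoop deltas start_index n d.toNat cur_index leftover

-- ===== PRECONDITION & SPEC =====
-- Pre_ restricts to the natural domain of the circular walk: either the immediate-return
-- case, or in-range nonnegative indices with costs at least as long as gas_stations.
-- It excludes inputs where A raises IndexError or recurses without bound (empty or
-- too-short costs list, out-of-range start or current index), and negative in-range
-- current indices, where A's walk rests on Python's accidental negative-index wraparound.
def Pre_gas_station_helper (gas_stations : List Int) (costs : List Int) (start_index : Int) (cur_index : Int) (second_round : Bool) (leftover : Int) : Prop :=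
  (second_round = true ∧ start_index = cur_index) ∨
  (0 < gas_stations.length ∧ gas_stations.length ≤ costs.length ∧
   0 ≤ start_index ∧ start_index < (gas_stations.length : Int) ∧
   0 ≤ cur_index ∧ cur_index < (gas_stations.length : Int))
instance (gas_stations : List Int) (costs : List Int) (start_index : Int) (cur_index : Int) (second_round : Bool) (leftover : Int) : Decidable (Pre_gas_station_helper gas_stations costs start_index cur_index second_round leftover) := by unfold Pre_gas_station_helper; infer_instance

def pvWitness_gas_station_helper : List Int × List Int × Int × Int × Bool × Int :=
  ([1, 2, 2], [2, 1, 1], 1, 2, false, 0)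

def Spec_gas_station_helper (gas_stations : List Int) (costs : List Int) (start_index : Int) (cur_index : Int) (second_round : Bool) (leftover : Int) (out : Int) : Prop := out = gas_station_helper_alt gas_stations costs start_index cur_index second_round leftover
instance (gas_stations : List Int) (costs : List Int) (start_index : Int) (cur_index : Int) (second_round : Bool) (leftover : Int) (out : Int) : Decidable (Spec_gas_station_helper gas_stations costs start_index cur_index second_round leftover out) := by unfold Spec_gas_station_helper; infer_instance

-- ===== CLAIM (what is proved, stated in full; the proofs are below) =====
def Claim_equal_gas_station_helper : Prop := ∀ (gas_stations : List Int) (costs : List Int) (start_index : Int) (cur_index : Int) (second_round : Bool) (leftover : Int), Dom_gas_station_helper gas_stations costs start_index cur_index second_round leftover → Pre_gas_station_helper gas_stations costs start_index cur_index second_round leftover → Spec_gas_station_helper gas_stations costs start_index cur_index second_round leftover (gas_station_helper gas_stations costs start_index cur_index second_round leftover)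

-- ===== LEMMAS AND PROOFS =====

-- the abstract one-step walk both programs perform, used as a bridge
def stepLoop (gas_stations : List Int) (costs : List Int) (start_index : Int) (n : Int) :
    Nat → Int → Int → Int
  | 0, _, _ => start_index
  | d + 1, cur, total =>
    let t := total + (PySem.List.pyGetD gas_stations cur 0 - PySem.List.pyGetD costs cur 0)
    if t < 0 then -1
    else stepLoop gas_stations costs start_index n d (if cur = n - 1 then 0 else cur + 1) t

lemma pv_emod_window (n x : Int) (hn : 0 < n) (h1 : -n < x) (h2 : x < n) :
    x % n = if 0 ≤ x then x else x + n := by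
  split_ifs with h
  · exact Int.emod_eq_of_lt h h2
  · have e1 : (x + n) % n = x + n := Int.emod_eq_of_lt (by omega) (by omega)
    have e2 : (x + n) % n = x % n := by
      have h := Int.add_mul_emod_self_left x n 1
      rw [mul_one] at h
      exact h
    omega

lemma pv_dist_zero (n s c : Int) (_hn : 0 < n) (hs0 : 0 ≤ s) (hs : s < n)
    (hc0 : 0 ≤ c) (hc : c < n) : (s - c) % n = 0 ↔ s = c := by
  rw [pv_emod_window n (s - c) _hn (by omega) (by omega)]
  split_ifs <;> omega

lemma pv_succ_wrap (n x : Int) (_hn : 0 < n) (hx0 : 0 ≤ x) (hx : x < n) :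
    (x + 1) % n = if x = n - 1 then 0 else x + 1 := by
  split_ifs with h
  · subst h; simp
  · exact Int.emod_eq_of_lt (by omega) (by omega)

lemma pv_dist_step (n s c : Int) (hn : 0 < n) (hs0 : 0 ≤ s) (hs : s < n)
    (hc0 : 0 ≤ c) (hc : c < n) (hne : s ≠ c) :
    (s - (if c = n - 1 then 0 else c + 1)) % n = (s - c) % n - 1 := by
  rw [pv_emod_window n (s - c) hn (by omega) (by omega)]
  split_ifs with h h2 h3 <;>
    rw [pv_emod_window n _ hn (by omega) (by omega)] <;> split_ifs <;> omega

-- B's loop equals the abstract walk from any in-range position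
lemma altLoop_eq_stepLoop (deltas gas_stations costs : List Int) (s : Int) (n : Int)
    (hn : 0 < n)
    (hdel : ∀ i : Int, 0 ≤ i → i < n → PySem.List.pyGetD deltas i 0
      = PySem.List.pyGetD gas_stations i 0 - PySem.List.pyGetD costs i 0) :
    ∀ (d : Nat) (i l : Int), 0 ≤ i → i < n →
    altLoop deltas s n d i l = stepLoop gas_stations costs s n d i l := by
  intro d
  induction d with
  | zero => intro i l _ _; rfl
  | succ d ih =>
    intro i l hi0 hi1
    simp only [altLoop, stepLoop, hdel i hi0 hi1]
    by_cases hneg : l + (PySem.List.pyGetD gas_stations i 0 - PySem.List.pyGetD costs i 0) < 0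
    · simp only [hneg, if_true]
    · simp only [hneg, if_false]
      rw [PySem.Int.mod_eq_emod_of_pos hn, pv_succ_wrap n i hn hi0 hi1]
      exact ih _ _ (by split_ifs <;> omega) (by split_ifs <;> omega)

-- A's recursion with second_round = true equals the abstract walk, when the
-- remaining distance to start_index is d and fuel exceeds d
lemma gasA_eq_stepLoop (gas_stations costs : List Int) (s : Int)
    (hlen : gas_stations.length ≤ costs.length)
    (hs0 : 0 ≤ s) (hs : s < (gas_stations.length : Int)) :
    ∀ (d fuel : Nat) (c l : Int), d < fuel → 0 ≤ c → c < (gas_stations.length : Int) →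
    ((d : Int) = (s - c) % (gas_stations.length : Int)) →
    gasFuelA gas_stations costs s fuel c true l
      = stepLoop gas_stations costs s (gas_stations.length : Int) d c l := by
  intro d
  induction d with
  | zero =>
    intro fuel c l hf hc0 hc hd
    obtain ⟨f, rfl⟩ : ∃ f, fuel = f + 1 := ⟨fuel - 1, by omega⟩
    have hn : 0 < (gas_stations.length : Int) := by omega
    have hsc : s = c := (pv_dist_zero _ s c hn hs0 hs hc0 hc).mp (by omega)
    simp [gasFuelA, stepLoop, hsc]
  | succ d ih =>
    intro fuel c l hf hc0 hc hd
    obtain ⟨f, rfl⟩ : ∃ f, fuel = f + 1 := ⟨fuel - 1, by omega⟩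
    have hn : 0 < (gas_stations.length : Int) := by omega
    have hne : s ≠ c := by
      intro h
      rw [(pv_dist_zero _ s c hn hs0 hs hc0 hc).mpr h] at hd
      omega
    have hcc : c < (costs.length : Int) := by omega
    have hgs := PySem.List.pyGet?_eq_some_getElem gas_stations hc0 hc
    have hcs := PySem.List.pyGet?_eq_some_getElem costs hc0 hcc
    have hgd := PySem.List.pyGetD_eq_getElem gas_stations (0 : Int) hc0 hc
    have hcd := PySem.List.pyGetD_eq_getElem costs (0 : Int) hc0 hcc
    simp only [gasFuelA, stepLoop, hne, false_and, if_false, hgs, hcs, hgd, hcd,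
      PySem.List.len_eq]
    have harith : l + (gas_stations[c.toNat] - costs[c.toNat]) < 0 ↔
        l + gas_stations[c.toNat] - costs[c.toNat] < 0 := by omega
    by_cases hneg : l + gas_stations[c.toNat] - costs[c.toNat] < 0
    · simp only [harith.mpr hneg, hneg, if_true]
    · simp only [harith.not.mpr hneg, hneg, if_false]
      have hstep := ih f (if c = (gas_stations.length : Int) - 1 then 0 else c + 1)
        (l + gas_stations[c.toNat] - costs[c.toNat]) (by omega)
        (by split_ifs <;> omega) (by split_ifs <;> omega)
        (by rw [pv_dist_step _ s c hn hs0 hs hc0 hc hne]; omega)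
      rw [show l + (gas_stations[c.toNat] - costs[c.toNat])
            = l + gas_stations[c.toNat] - costs[c.toNat] from by ring]
      exact hstep

-- when start ≠ cur, the first call of A ignores second_round
lemma gasA_sr_irrel (gas_stations costs : List Int) (s : Int) (f : Nat) (c l : Int)
    (h : s ≠ c) (sr : Bool) :
    gasFuelA gas_stations costs s (f + 1) c sr l
      = gasFuelA gas_stations costs s (f + 1) c true l := by
  rw [gasFuelA, gasFuelA]
  simp [h]

-- A starting at start_index with second_round = false walks one full lap
lemma gasA_full_lap (gas_stations costs : List Int) (s l : Int) (m : Nat)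
    (hm : gas_stations.length = m + 1)
    (h2 : gas_stations.length ≤ costs.length)
    (h3 : 0 ≤ s) (h4 : s < (gas_stations.length : Int)) :
    gasFuelA gas_stations costs s (m + 2) s false l
      = stepLoop gas_stations costs s (gas_stations.length : Int) (m + 1) s l := by
  have hn : 0 < (gas_stations.length : Int) := by omega
  have hcc : s < (costs.length : Int) := by omega
  have hgs := PySem.List.pyGet?_eq_some_getElem gas_stations h3 h4
  have hcs := PySem.List.pyGet?_eq_some_getElem costs h3 hcc
  have hgd := PySem.List.pyGetD_eq_getElem gas_stations (0 : Int) h3 h4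
  have hcd := PySem.List.pyGetD_eq_getElem costs (0 : Int) h3 hcc
  rw [gasFuelA, stepLoop]
  simp only [Bool.false_eq_true, and_false, if_false, hgs, hcs, hgd, hcd,
    PySem.List.len_eq]
  have harith : l + (gas_stations[s.toNat] - costs[s.toNat]) < 0 ↔
      l + gas_stations[s.toNat] - costs[s.toNat] < 0 := by omega
  by_cases hneg : l + gas_stations[s.toNat] - costs[s.toNat] < 0
  · simp only [harith.mpr hneg, hneg, if_true]
  · simp only [harith.not.mpr hneg, hneg, if_false]
    have hdist : ((m : Int))
        = (s - (if s = (gas_stations.length : Int) - 1 then 0 else s + 1))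
            % (gas_stations.length : Int) := by
      split_ifs with h
      · rw [sub_zero, Int.emod_eq_of_lt h3 h4]
        omega
      · rw [show s - (s + 1) = -1 from by ring,
          pv_emod_window _ _ hn (by omega) (by omega)]
        split_ifs <;> omega
    have hstep := gasA_eq_stepLoop gas_stations costs s h2 h3 h4 m (m + 1)
      (if s = (gas_stations.length : Int) - 1 then 0 else s + 1)
      (l + gas_stations[s.toNat] - costs[s.toNat]) (by omega)
      (by split_ifs <;> omega) (by split_ifs <;> omega) hdist
    rw [show l + (gas_stations[s.toNat] - costs[s.toNat])
          = l + gas_stations[s.toNat] - costs[s.toNat] from by ring]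
    exact hstep

-- ===== VERDICT (by name: the statement is the Claim_ definition above) =====
theorem gas_station_helper_spec : Claim_equal_gas_station_helper := by
  intro gs costs s c sr l _ hPre
  unfold Spec_gas_station_helper gas_station_helper gas_station_helper_alt
  by_cases hImm : sr = true ∧ s = c
  · obtain ⟨hsr, hse⟩ := hImm
    subst hsr hse
    simp [gasFuelA]
  · simp only [hImm, if_false]
    rcases hPre with h | ⟨h1, h2, h3, h4, h5, h6⟩
    · exact absurd h hImm
    have hn : 0 < (gs.length : Int) := by exact_mod_cast h1
    simp only [PySem.List.len_eq, PySem.Int.mod_eq_emod_of_pos hn]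
    have hdel : ∀ i : Int, 0 ≤ i → i < (gs.length : Int) →
        PySem.List.pyGetD ((PySem.List.pyRange 0 (gs.length : Int) 1).map
          (fun i => PySem.List.pyGetD gs i 0 - PySem.List.pyGetD costs i 0)) i 0
          = PySem.List.pyGetD gs i 0 - PySem.List.pyGetD costs i 0 := by
      intro i hi0 hilt
      exact PySem.List.pyGetD_map_pyRange_of_nonneg _ _ _ _ hi0 hilt
    have hBL : ∀ (k : Nat) (l' : Int),
        altLoop ((PySem.List.pyRange 0 (gs.length : Int) 1).map
            (fun i => PySem.List.pyGetD gs i 0 - PySem.List.pyGetD costs i 0))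
            s (gs.length : Int) k c l'
          = stepLoop gs costs s (gs.length : Int) k c l' := by
      intro k l'
      exact altLoop_eq_stepLoop _ gs costs s (gs.length : Int) hn hdel k c l' h5 h6
    by_cases hne : s = c
    · -- start = cur but second_round is false: one full lap of length n
      have hsr : sr = false := by
        cases sr
        · rfl
        · exact absurd ⟨rfl, hne⟩ hImm
      subst hsr
      subst hne
      obtain ⟨m, hm⟩ : ∃ m, gs.length = m + 1 := ⟨gs.length - 1, by omega⟩
      have hd0 : (s - s) % (gs.length : Int) = 0 := by simp
      rw [hd0, if_pos rfl]
      simp only [Int.toNat_natCast]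
      rw [hBL]
      have hfl := gasA_full_lap gs costs s l m hm h2 h3 h4
      rw [show m + 2 = gs.length + 1 from by omega] at hfl
      rw [show m + 1 = gs.length from hm.symm] at hfl
      exact hfl
    · -- start ≠ cur: path of length (s - c) % n
      have hd0 : (s - c) % (gs.length : Int) ≠ 0 := by
        intro h0
        exact hne ((pv_dist_zero _ s c hn h3 h4 h5 h6).mp h0)
      have hm0 : 0 ≤ (s - c) % (gs.length : Int) := Int.emod_nonneg _ (by omega)
      have hm1 : (s - c) % (gs.length : Int) < (gs.length : Int) := Int.emod_lt_of_pos _ hn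
      simp only [hd0, if_false]
      rw [hBL]
      rw [gasA_sr_irrel gs costs s gs.length c l hne sr]
      exact gasA_eq_stepLoop gs costs s h2 h3 h4 ((s - c) % (gs.length : Int)).toNat
        (gs.length + 1) c l (by omega) h5 h6 (by omega)
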